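-- pv_equiv track=rewrite | github.com/cerredz/HarnessHub | harnessiq/utils/ledger_sinks.py | _resolve_instagram_lead_header
-- ===== SOURCE A (Python) =====
-- from typing import Any, Mapping, Sequence
--
-- _INSTAGRAM_LEAD_EXPORT_HEADER = ("name", "instagram_url", "email_address", "username")
--
-- def _resolve_instagram_lead_header(row_dicts: Sequence[Mapping[str, Any]]) -> list[str] | None:
--     if not row_dicts:
--         return None
--     allowed = set(_INSTAGRAM_LEAD_EXPORT_HEADER)
--     if any(set(row) - allowed for row in row_dicts):
--         return None
--     if not any("instagram_url" in row for row in row_dicts):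
--         return None
--     return [column for column in _INSTAGRAM_LEAD_EXPORT_HEADER if any(column in row for row in row_dicts)]
-- ===== SOURCE B (Python) =====
-- _INSTAGRAM_LEAD_EXPORT_HEADER = ("name", "instagram_url", "email_address", "username")
--
-- def _resolve_instagram_lead_header(row_dicts):
--     if not row_dicts:
--         return None
--     present = set()
--     for row in row_dicts:
--         present.update(row)
--     if present - set(_INSTAGRAM_LEAD_EXPORT_HEADER):
--         return None
--     if "instagram_url" not in present:
--         return None
--     return [c for c in _INSTAGRAM_LEAD_EXPORT_HEADER if c in present]
-- ===== Notes on version B (the rewrite author's own statement) =====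
-- stated objective: alternative
-- what changed: B accumulates the union of all row keys into one set in a single pass over row_dicts and then validates and filters against that single set, instead of A's three separate any()-scans over all rows (one per header column in the final comprehension).
import Mathlib
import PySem

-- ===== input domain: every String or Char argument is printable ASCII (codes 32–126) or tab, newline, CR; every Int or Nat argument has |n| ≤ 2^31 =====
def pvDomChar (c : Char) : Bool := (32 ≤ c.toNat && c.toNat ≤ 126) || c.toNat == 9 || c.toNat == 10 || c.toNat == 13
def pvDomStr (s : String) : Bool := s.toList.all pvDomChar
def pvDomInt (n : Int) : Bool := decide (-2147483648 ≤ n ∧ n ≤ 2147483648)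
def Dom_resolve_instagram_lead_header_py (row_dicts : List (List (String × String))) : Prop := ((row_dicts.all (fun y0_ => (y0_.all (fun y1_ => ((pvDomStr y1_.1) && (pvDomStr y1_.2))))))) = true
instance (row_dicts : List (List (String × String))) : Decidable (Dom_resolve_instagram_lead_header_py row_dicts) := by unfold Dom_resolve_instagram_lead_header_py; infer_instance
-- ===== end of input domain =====

-- B builds the union of all row keys in one pass and validates/filters against that
-- single set, instead of A's repeated any()-scans over the rows. Objective: alternative decomposition.

-- the module constant _INSTAGRAM_LEAD_EXPORT_HEADER
def pvHeader : List String := ["name", "instagram_url", "email_address", "username"]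

-- ===== PORT A =====
def resolve_instagram_lead_header_py (row_dicts : List (List (String × String))) : Option (List String) :=
  if row_dicts = [] then none
  else
    let allowed : PySem.Set String := PySem.Set.ofList pvHeader
    if row_dicts.any (fun row => PySem.Set.diff (PySem.Set.ofList (row.map Prod.fst)) allowed ≠ []) then none
    else if ¬ row_dicts.any (fun row => row.any (fun kv => kv.1 == "instagram_url")) then none
    else some (pvHeader.filter (fun column => row_dicts.any (fun row => row.any (fun kv => kv.1 == column))))

-- ===== PORT B =====
def resolve_instagram_lead_header_py_alt (row_dicts : List (List (String × String))) : Option (List String) :=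
  if row_dicts = [] then none
  else
    let present : PySem.Set String :=
      row_dicts.foldl (fun s row => PySem.Set.update s (row.map Prod.fst)) PySem.Set.empty
    if PySem.Set.diff present (PySem.Set.ofList pvHeader) ≠ [] then none
    else if ¬ PySem.Set.contains present "instagram_url" then none
    else some (pvHeader.filter (fun c => PySem.Set.contains present c))

-- ===== PRECONDITION & SPEC =====
def Spec_resolve_instagram_lead_header_py (row_dicts : List (List (String × String))) (out : Option (List String)) : Prop := out = resolve_instagram_lead_header_py_alt row_dicts
instance (row_dicts : List (List (String × String))) (out : Option (List String)) : Decidable (Spec_resolve_instagram_lead_header_py row_dicts out) := by unfold Spec_resolve_instagram_lead_header_py; infer_instance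

-- ===== CLAIM (what is proved, stated in full; the proofs are below) =====
def Claim_equal_resolve_instagram_lead_header_py : Prop := ∀ (row_dicts : List (List (String × String))), Dom_resolve_instagram_lead_header_py row_dicts → Spec_resolve_instagram_lead_header_py row_dicts (resolve_instagram_lead_header_py row_dicts)

-- ===== LEMMAS AND PROOFS =====

-- membership in B's accumulated union-of-keys set
theorem pv_mem_fold_update {rows : List (List (String × String))} {s : PySem.Set String} {x : String} :
    x ∈ rows.foldl (fun s row => PySem.Set.update s (row.map Prod.fst)) s ↔
      x ∈ s ∨ ∃ row ∈ rows, x ∈ row.map Prod.fst := by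
  induction rows generalizing s with
  | nil => simp
  | cons r rs ih =>
    simp only [List.foldl_cons, ih, PySem.Set.mem_update, List.mem_cons]
    constructor
    · rintro (h | h)
      · rcases h with h | h
        · exact Or.inl h
        · exact Or.inr ⟨r, Or.inl rfl, h⟩
      · rcases h with ⟨row, hr, hx⟩
        exact Or.inr ⟨row, Or.inr hr, hx⟩
    · rintro (h | ⟨row, hr | hr, hx⟩)
      · exact Or.inl (Or.inl h)
      · exact Or.inl (Or.inr (hr ▸ hx))
      · exact Or.inr ⟨row, hr, hx⟩

theorem pv_diff_ne_nil {s t : List String} :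
    PySem.Set.diff s t ≠ [] ↔ ∃ x ∈ s, x ∉ t := by
  simp [PySem.Set.diff, Ne, List.filter_eq_nil_iff]

-- ===== VERDICT (by name: the statement is the Claim_ definition above) =====
theorem resolve_instagram_lead_header_py_spec : Claim_equal_resolve_instagram_lead_header_py := by
  intro rows _
  unfold Spec_resolve_instagram_lead_header_py
  unfold resolve_instagram_lead_header_py resolve_instagram_lead_header_py_alt
  by_cases hnil : rows = []
  · simp [hnil]
  simp only [if_neg hnil]
  have hmem : ∀ x : String,
      (x ∈ rows.foldl (fun s row => PySem.Set.update s (row.map Prod.fst)) PySem.Set.empty) ↔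
        ∃ row ∈ rows, x ∈ row.map Prod.fst := by
    intro x
    rw [pv_mem_fold_update]
    simp [PySem.Set.empty]
  have hcontains : ∀ x : String,
      PySem.Set.contains (rows.foldl (fun s row => PySem.Set.update s (row.map Prod.fst)) PySem.Set.empty) x
        = rows.any (fun row => row.any (fun kv => kv.1 == x)) := by
    intro x
    rw [Bool.eq_iff_iff]
    simp only [PySem.Set.contains, List.contains_iff_mem, hmem, List.any_eq_true, List.mem_map]
    constructor
    · rintro ⟨row, hr, kv, hkv, hx⟩
      exact ⟨row, hr, kv, hkv, by simp [hx]⟩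
    · rintro ⟨row, hr, kv, hkv, hx⟩
      exact ⟨row, hr, kv, hkv, by simpa using hx⟩
  have hdiff :
      (PySem.Set.diff (rows.foldl (fun s row => PySem.Set.update s (row.map Prod.fst)) PySem.Set.empty)
          (PySem.Set.ofList pvHeader) ≠ []) ↔
        rows.any (fun row => PySem.Set.diff (PySem.Set.ofList (row.map Prod.fst)) (PySem.Set.ofList pvHeader) ≠ []) = true := by
    rw [pv_diff_ne_nil]
    simp only [List.any_eq_true, decide_eq_true_eq, hmem, pv_diff_ne_nil, PySem.Set.mem_ofList]
    constructor
    · rintro ⟨x, ⟨row, hr, hx⟩, hnx⟩; exact ⟨row, hr, x, hx, hnx⟩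
    · rintro ⟨row, hr, x, hx, hnx⟩; exact ⟨x, ⟨row, hr, hx⟩, hnx⟩
  by_cases hd : (PySem.Set.diff (rows.foldl (fun s row => PySem.Set.update s (row.map Prod.fst)) PySem.Set.empty)
      (PySem.Set.ofList pvHeader) ≠ [])
  · rw [if_pos (hdiff.mp hd), if_pos hd]
  · rw [if_neg (fun h => hd (hdiff.mpr h)), if_neg hd]
    simp only [hcontains]
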